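-- pv_equiv track=rewrite | github.com/jiseong7278/Baekjoon-Repo | 프로그래머스/2/12900. 2 x n 타일링/2 x n 타일링.py | solution
-- ===== SOURCE A (Python) =====
-- def solution(n):
--     tile = []
--
--     tile.append(1)
--     tile.append(2)
--
--     if n > 2:
--         for i in range(2, n):
--             tile.append((tile[i-2] + tile[i-1]) % 1000000007)
--
--     return tile[n-1]
-- ===== SOURCE B (Python) =====
-- def solution(n):
--     MOD = 1000000007
--     def fib_pair(k):
--         # (F(k), F(k+1)) modulo MOD, with F(0) = 0, F(1) = 1
--         if k <= 0:
--             return (0, 1)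
--         a, b = fib_pair(k // 2)
--         c = a * (2 * b - a) % MOD
--         d = (a * a + b * b) % MOD
--         if k % 2 == 1:
--             return (d, (c + d) % MOD)
--         return (c, d)
--     return fib_pair(n)[1]
-- ===== Notes on version B (the rewrite author's own statement) =====
-- stated objective: faster
-- what changed: Replaces the linear dynamic-programming list build with recursive Fibonacci fast doubling modulo 1000000007, computing the answer in O(log n) multiplications with no list at all.
-- intended difference: For n = 0 A returns 2 via Python's negative-index wraparound (tile[-1]); B returns 1 = Fib(1), the intended count of tilings of an empty 2x0 board. — e.g. on solution(0): A returns 2, B returns 1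
import Mathlib
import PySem

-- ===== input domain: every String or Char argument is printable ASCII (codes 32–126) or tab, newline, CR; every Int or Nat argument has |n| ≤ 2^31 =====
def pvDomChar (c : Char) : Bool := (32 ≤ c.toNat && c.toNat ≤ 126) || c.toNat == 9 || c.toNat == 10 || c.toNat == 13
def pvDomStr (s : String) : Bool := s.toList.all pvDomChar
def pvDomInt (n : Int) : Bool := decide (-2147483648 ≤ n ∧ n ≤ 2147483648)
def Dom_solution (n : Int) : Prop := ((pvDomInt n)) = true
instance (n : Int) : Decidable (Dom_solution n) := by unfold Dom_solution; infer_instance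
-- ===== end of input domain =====

-- B replaces A's linear DP list with Fibonacci fast doubling mod 1e9+7 (O(log n) instead of O(n));
-- for n = 0 A's value 2 comes from negative-index wraparound, B returns the intended 1.


-- ===== PORT A =====
-- literal port of A: build the DP list, then return tile[n-1]
-- (pyGetD with default 0 is used under the in-range conditions Pre_ guarantees; inside
--  the loop the indices i-2, i-1 are always in range)
def solution (n : Int) : Int :=
  let tile : List Int := [] ++ [1] ++ [2]
  let tile :=
    if n > 2 then
      (PySem.List.pyRange 2 n 1).foldl
        (fun t i =>
          t ++ [PySem.Int.mod (PySem.List.pyGetD t (i - 2) 0 + PySem.List.pyGetD t (i - 1) 0) 1000000007])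
        tile
    else tile
  PySem.List.pyGetD tile (n - 1) 0  -- Python raises IndexError exactly where this index is out of range; Pre_ excludes that

-- ===== PORT B =====
-- fib_pair k = (F(k), F(k+1)) mod 1e9+7, fast doubling (port of Source B's fib_pair)
def fibPair (k : Int) : Int × Int :=
  if k ≤ 0 then (0, 1)
  else
    let p := fibPair (PySem.Int.floordiv k 2)
    let a := p.1
    let b := p.2
    let c := PySem.Int.mod (a * (2 * b - a)) 1000000007
    let d := PySem.Int.mod (a * a + b * b) 1000000007
    if PySem.Int.mod k 2 = 1 then (d, PySem.Int.mod (c + d) 1000000007) else (c, d)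
termination_by k.toNat
decreasing_by
  rw [PySem.Int.floordiv_eq_ediv_of_pos (by omega)]
  omega

def solution_alt (n : Int) : Int := (fibPair n).2

-- ===== PRECONDITION & SPEC =====
-- Pre_ excludes exactly n ≤ -2, where A raises IndexError (tile[n-1] out of range).
def Pre_solution (n : Int) : Prop := -1 ≤ n
instance (n : Int) : Decidable (Pre_solution n) := by unfold Pre_solution; infer_instance
def pvWitness_solution : Int := (5)

-- For n = 0 A returns 2 via Python's negative-index wraparound (tile[-1]); B returns 1 = Fib(1),
-- the intended count of tilings of an empty 2x0 board.
def D_solution (n : Int) : Prop := n = 0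
instance (n : Int) : Decidable (D_solution n) := by unfold D_solution; infer_instance

def Spec_solution (n : Int) (out : Int) : Prop := ¬ D_solution n → out = solution_alt n
instance (n : Int) (out : Int) : Decidable (Spec_solution n out) := by unfold Spec_solution; infer_instance

def pvDiffWitness_solution : Int := (0)
def pvDiffWitnessOut_solution : Int × Int := (2, 1)

-- ===== CLAIM (what is proved, stated in full; the proofs are below) =====
def Claim_unchanged_solution : Prop := ∀ (n : Int), Dom_solution n → Pre_solution n → Spec_solution n (solution n)
def Claim_changed_solution : Prop := Dom_solution (pvDiffWitness_solution) ∧ Pre_solution (pvDiffWitness_solution) ∧ D_solution (pvDiffWitness_solution) ∧ solution (pvDiffWitness_solution) = pvDiffWitnessOut_solution.1 ∧ solution_alt (pvDiffWitness_solution) = pvDiffWitnessOut_solution.2 ∧ pvDiffWitnessOut_solution.1 ≠ pvDiffWitnessOut_solution.2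
def Claim_exact_solution : Prop := ∀ (n : Int), Dom_solution n → Pre_solution n → D_solution n → solution n ≠ solution_alt n

-- ===== LEMMAS AND PROOFS =====

-- fm k = F(k) mod 1e9+7 as an Int, with F the classical Fibonacci sequence
def fm (k : Nat) : Int := (Nat.fib k : Int) % 1000000007

lemma fm_add (j : Nat) :
    PySem.Int.mod (fm j + fm (j + 1)) 1000000007 = fm (j + 2) := by
  rw [PySem.Int.mod_eq_emod_of_pos (by norm_num)]
  simp only [fm]
  have h1 : (Nat.fib j : Int) % 1000000007 ≡ (Nat.fib j : Int) [ZMOD 1000000007] :=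
    Int.emod_emod_of_dvd _ dvd_rfl
  have h2 : (Nat.fib (j + 1) : Int) % 1000000007 ≡ (Nat.fib (j + 1) : Int) [ZMOD 1000000007] :=
    Int.emod_emod_of_dvd _ dvd_rfl
  calc ((Nat.fib j : Int) % 1000000007 + (Nat.fib (j + 1) : Int) % 1000000007) % 1000000007
      = ((Nat.fib j : Int) + (Nat.fib (j + 1) : Int)) % 1000000007 := h1.add h2
    _ = (Nat.fib (j + 2) : Int) % 1000000007 := by rw [Nat.fib_add_two]; push_cast; ring_nf

lemma fm_double (m : Nat) :
    PySem.Int.mod (fm m * (2 * fm (m + 1) - fm m)) 1000000007 = fm (2 * m) := by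
  rw [PySem.Int.mod_eq_emod_of_pos (by norm_num)]
  simp only [fm]
  have hle : Nat.fib m ≤ 2 * Nat.fib (m + 1) :=
    le_trans Nat.fib_le_fib_succ (by omega)
  have hfib : (Nat.fib (2 * m) : Int) = Nat.fib m * (2 * Nat.fib (m + 1) - Nat.fib m) := by
    rw [Nat.fib_two_mul m, Nat.cast_mul, Nat.cast_sub hle]; push_cast; ring
  have h1 : (Nat.fib m : Int) % 1000000007 ≡ (Nat.fib m : Int) [ZMOD 1000000007] :=
    Int.emod_emod_of_dvd _ dvd_rfl
  have h2 : (Nat.fib (m + 1) : Int) % 1000000007 ≡ (Nat.fib (m + 1) : Int) [ZMOD 1000000007] :=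
    Int.emod_emod_of_dvd _ dvd_rfl
  calc ((Nat.fib m : Int) % 1000000007 * (2 * ((Nat.fib (m + 1) : Int) % 1000000007) - (Nat.fib m : Int) % 1000000007)) % 1000000007
      = ((Nat.fib m : Int) * (2 * (Nat.fib (m + 1) : Int) - (Nat.fib m : Int))) % 1000000007 :=
        h1.mul ((h2.mul_left 2).sub h1)
    _ = (Nat.fib (2 * m) : Int) % 1000000007 := by rw [hfib]

lemma fm_double_succ (m : Nat) :
    PySem.Int.mod (fm m * fm m + fm (m + 1) * fm (m + 1)) 1000000007 = fm (2 * m + 1) := by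
  rw [PySem.Int.mod_eq_emod_of_pos (by norm_num)]
  simp only [fm]
  have h1 : (Nat.fib m : Int) % 1000000007 ≡ (Nat.fib m : Int) [ZMOD 1000000007] :=
    Int.emod_emod_of_dvd _ dvd_rfl
  have h2 : (Nat.fib (m + 1) : Int) % 1000000007 ≡ (Nat.fib (m + 1) : Int) [ZMOD 1000000007] :=
    Int.emod_emod_of_dvd _ dvd_rfl
  calc ((Nat.fib m : Int) % 1000000007 * ((Nat.fib m : Int) % 1000000007) + (Nat.fib (m + 1) : Int) % 1000000007 * ((Nat.fib (m + 1) : Int) % 1000000007)) % 1000000007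
      = ((Nat.fib m : Int) * (Nat.fib m : Int) + (Nat.fib (m + 1) : Int) * (Nat.fib (m + 1) : Int)) % 1000000007 :=
        (h1.mul h1).add (h2.mul h2)
    _ = (Nat.fib (2 * m + 1) : Int) % 1000000007 := by
        rw [Nat.fib_two_mul_add_one m]; push_cast; ring_nf

-- fast doubling computes fm (strong induction on k.toNat)
lemma fibPair_eq_aux (N : Nat) : ∀ (k : Int), 0 ≤ k → k.toNat = N →
    fibPair k = (fm k.toNat, fm (k.toNat + 1)) := by
  induction N using Nat.strong_induction_on with
  | _ N ih =>
    intro k hk hN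
    rw [fibPair]
    by_cases h0 : k ≤ 0
    · have : k = 0 := le_antisymm h0 hk
      subst this
      simp only [if_pos le_rfl]
      decide
    · have hkpos : 0 < k := lt_of_not_ge h0
      have hN0 : 0 < N := by omega
      simp only [h0, if_false]
      have hdiv : PySem.Int.floordiv k 2 = k / 2 :=
        PySem.Int.floordiv_eq_ediv_of_pos (by norm_num)
      have hhalf : (k / 2).toNat = N / 2 := by omega
      have hIH := ih (N / 2) (by omega) (k / 2) (by omega) hhalf
      rw [hdiv, hIH, hhalf]
      have hmod : PySem.Int.mod k 2 = k % 2 :=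
        PySem.Int.mod_eq_emod_of_pos (by norm_num)
      rw [hmod]
      by_cases hpar : k % 2 = 1
      · rw [if_pos hpar, fm_double (N / 2), fm_double_succ (N / 2), fm_add (2 * (N / 2)), hN]
        have hodd : N % 2 = 1 := by omega
        simp only [Prod.mk.injEq]
        exact ⟨by congr 1; omega, by congr 1; omega⟩
      · rw [if_neg hpar, fm_double (N / 2), fm_double_succ (N / 2), hN]
        have heven : N % 2 = 0 := by omega
        simp only [Prod.mk.injEq]
        exact ⟨by congr 1; omega, by congr 1; omega⟩

lemma solution_alt_eq (n : Int) (hn : 0 ≤ n) : solution_alt n = fm (n.toNat + 1) := by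
  unfold solution_alt
  rw [fibPair_eq_aux n.toNat n hn rfl]

-- the DP list A builds: after the loop, tile[j] = F(j+2) mod 1e9+7
lemma tile_inv (m : Nat) :
    (PySem.List.pyRange 2 (2 + (m : Int)) 1).foldl
      (fun t i =>
        t ++ [PySem.Int.mod (PySem.List.pyGetD t (i - 2) 0 + PySem.List.pyGetD t (i - 1) 0) 1000000007])
      ([] ++ [1] ++ [2]) = (List.range (2 + m)).map (fun j => fm (j + 2)) := by
  induction m with
  | zero =>
    rw [PySem.List.pyRange_one_eq_nil (by norm_num)]
    decide
  | succ m ih =>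
    have hcast : (2 : Int) + ((m + 1 : Nat) : Int) = (2 + (m : Int)) + 1 := by push_cast; ring
    rw [hcast, PySem.List.pyRange_one_succ_right (by omega), List.foldl_append, ih]
    simp only [List.foldl_cons, List.foldl_nil]
    have hi2 : (2 + (m : Int)) - 2 = ((m : Nat) : Int) := by ring
    have hi1 : (2 + (m : Int)) - 1 = ((m + 1 : Nat) : Int) := by push_cast; ring
    rw [hi2, hi1]
    simp only [PySem.List.pyGetD_natCast]
    rw [List.getD_eq_getElem _ _ (by simp), List.getD_eq_getElem _ _ (by simp; omega)]
    simp only [List.getElem_map, List.getElem_range]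
    have : m + 1 + 2 = m + 2 + 1 := by ring
    rw [this, fm_add (m + 2)]
    rw [show 2 + (m + 1) = (2 + m) + 1 from rfl, List.range_succ, List.map_append]
    simp only [List.map_cons, List.map_nil]
    rw [show m + 2 + 2 = 2 + m + 2 by ring]

-- ===== VERDICT (by name: the statement is the Claim_ definition above) =====
theorem solution_spec : Claim_unchanged_solution := by
  intro n hdom hpre hD
  have hn1 : -1 ≤ n := hpre
  by_cases hneg : n = -1
  · subst hneg
    have hB : solution_alt (-1) = 1 := by rw [solution_alt, fibPair]; norm_num
    rw [hB]; decide
  · have hn : 1 ≤ n := by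
      rcases lt_or_ge n 1 with h | h
      · exfalso; interval_cases n
        · exact hneg rfl
        · exact hD rfl
      · exact h
    rw [solution_alt_eq n (by omega)]
    simp only [solution]
    by_cases hbig : n > 2
    · rw [if_pos hbig]
      have hN : n = 2 + ((n.toNat - 2 : Nat) : Int) := by omega
      rw [hN, tile_inv (n.toNat - 2)]
      have hidx : 2 + ((n.toNat - 2 : Nat) : Int) - 1 = ((n.toNat - 1 : Nat) : Int) := by omega
      rw [hidx, PySem.List.pyGetD_natCast]
      rw [List.getD_eq_getElem _ _ (by simp; omega)]
      simp only [List.getElem_map, List.getElem_range]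
      congr 1
      omega
    · rw [if_neg hbig]
      interval_cases n
      · decide
      · decide

theorem solution_changed : Claim_changed_solution := by
  unfold Claim_changed_solution
  refine ⟨by decide, by decide, by decide, by decide, ?_, by decide⟩
  show solution_alt 0 = 1
  rw [solution_alt, fibPair]; norm_num

theorem solution_tight : Claim_exact_solution := by
  intro n _ _ hD
  subst hD
  have hB : solution_alt 0 = 1 := by rw [solution_alt, fibPair]; norm_num
  rw [hB]
  decide
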